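-- pv_equiv track=rewrite | github.com/periodicapp/WFCGSG2EB | ALP/Week4.py | checkValidZip
-- ===== SOURCE A (Python) =====
-- from typing import Dict, List, Tuple
--
-- def checkValidZip(matrix: List[List[int]]) -> bool:
--     # Sets are arrays of unique elements only
--     # Check if the rows as sets are the same length
--     for item in matrix:
--         # If they are not the same, an element was duplicated, so we know that row was incorrect
--         if(len(item) != len(set(item))):
--             return False
--     # Zip creates arrays from columns in a 2-D Array
--     for i in zip(*matrix):
--         # Check if the rows(ex-columns) as sets are the same length
--         # If they are not the same, an element was duplicated, so we know that row was incorrect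
--         if(len(i)!= len(set(i))):
--             return False
--     return True
-- ===== SOURCE B (Python) =====
-- def checkValidZip(matrix):
--     # single pass: per-column seen-sets (sized to the shortest row, mirroring zip's truncation)
--     m = min((len(r) for r in matrix), default=0)
--     col_sets = [set() for _ in range(m)]
--     for row in matrix:
--         seen = set()
--         for x in row:
--             if x in seen:
--                 return False
--             seen.add(x)
--         for x, s in zip(row, col_sets):
--             if x in s:
--                 return False
--             s.add(x)
--     return True
-- ===== Notes on version B (the rewrite author's own statement) =====
-- stated objective: alternative
-- what changed: Replaced A's two-phase check (all rows via len(set), then a transpose with zip(*matrix) checked the same way) with a single sweep over the rows that maintains one seen-set per column (sized to the shortest row, mirroring zip's truncation), so no transposed matrix is ever built.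
import Mathlib
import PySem

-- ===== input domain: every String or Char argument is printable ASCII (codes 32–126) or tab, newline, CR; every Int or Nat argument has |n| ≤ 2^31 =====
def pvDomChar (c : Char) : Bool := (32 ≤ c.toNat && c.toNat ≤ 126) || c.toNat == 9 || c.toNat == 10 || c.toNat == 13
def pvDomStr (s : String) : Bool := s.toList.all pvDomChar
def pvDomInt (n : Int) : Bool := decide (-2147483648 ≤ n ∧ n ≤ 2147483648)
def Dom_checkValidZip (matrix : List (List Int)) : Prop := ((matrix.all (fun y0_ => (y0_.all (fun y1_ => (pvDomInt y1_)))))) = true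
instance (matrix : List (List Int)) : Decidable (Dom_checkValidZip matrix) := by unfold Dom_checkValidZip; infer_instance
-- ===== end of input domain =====

-- B replaces A's two-phase row-check + zip(*matrix) transpose with a single sweep over the rows
-- maintaining one seen-set per column (alternative decomposition; same asymptotic cost).


-- ===== PORT A =====
-- zip(*matrix): the columns of the matrix, truncated at the shortest row (empty for matrix == []).
-- Exact: for j below the minimum row length, t.getD j 0 is exactly t[j].
def pyZipStar (rows : List (List Int)) : List (List Int) :=
  match rows with
  | [] => []
  | r :: rs =>
    (List.range (rs.foldl (fun a t => min a t.length) r.length)).map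
      (fun j => (r :: rs).map (fun t => t.getD j 0))

-- A: check every row with len(item) != len(set(item)), then every zip-column the same way.
def checkValidZip (matrix : List (List Int)) : Bool :=
  (matrix.all (fun item => item.length == (PySem.Set.ofList item).length)) &&
  ((pyZipStar matrix).all (fun i => i.length == (PySem.Set.ofList i).length))

-- ===== PORT B =====
-- inner row loop: "for x in row: if x in seen: return False; seen.add(x)" (true = found a duplicate)
def altRowDup : List Int → PySem.Set Int → Bool
  | [], _ => false
  | x :: xs, seen => if seen.contains x then true else altRowDup xs (seen.add x)

-- column loop: "for x, s in zip(row, col_sets): if x in s: return False; s.add(x)";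
-- none = early False, some = the updated column sets
def altCols : List Int → List (PySem.Set Int) → Option (List (PySem.Set Int))
  | _, [] => some []
  | [], _ :: _ => some []
  | x :: xs, s :: ss =>
    if s.contains x then none
    else
      match altCols xs ss with
      | none => none
      | some ss' => some (PySem.Set.add s x :: ss')

-- outer loop over the rows, threading the per-column seen-sets
def altGo : List (List Int) → List (PySem.Set Int) → Bool
  | [], _ => true
  | row :: rest, sets =>
    if altRowDup row PySem.Set.empty then false
    else
      match altCols row sets with
      | none => false
      | some sets' => altGo rest sets'

def checkValidZip_alt (matrix : List (List Int)) : Bool :=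
  let m : Nat :=
    match matrix with
    | [] => 0
    | r :: rs => rs.foldl (fun a t => min a t.length) r.length
  altGo matrix (List.replicate m PySem.Set.empty)

-- ===== PRECONDITION & SPEC =====
def Spec_checkValidZip (matrix : List (List Int)) (out : Bool) : Prop := out = checkValidZip_alt matrix
instance (matrix : List (List Int)) (out : Bool) : Decidable (Spec_checkValidZip matrix out) := by unfold Spec_checkValidZip; infer_instance

-- ===== CLAIM (what is proved, stated in full; the proofs are below) =====
def Claim_equal_checkValidZip : Prop := ∀ (matrix : List (List Int)), Dom_checkValidZip matrix → Spec_checkValidZip matrix (checkValidZip matrix)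

-- ===== LEMMAS AND PROOFS =====

-- column j of a matrix, reading t[j] as t.getD j 0 (exact for j below every row length)
def pvCol (j : Nat) (rows : List (List Int)) : List Int := rows.map (fun t => t.getD j 0)

lemma pv_foldl_min_le_acc (rs : List (List Int)) (a : Nat) :
    rs.foldl (fun a t => min a t.length) a ≤ a := by
  induction rs generalizing a with
  | nil => simp
  | cons r rs ih => exact le_trans (ih _) (Nat.min_le_left _ _)

lemma pv_foldl_min_le_mem (rs : List (List Int)) (a : Nat) (t : List Int) (ht : t ∈ rs) :
    rs.foldl (fun a t => min a t.length) a ≤ t.length := by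
  induction rs generalizing a with
  | nil => cases ht
  | cons r rs ih =>
    simp only [List.foldl_cons]
    rcases List.mem_cons.mp ht with rfl | ht
    · exact le_trans (pv_foldl_min_le_acc rs _) (Nat.min_le_right _ _)
    · exact ih _ ht

lemma pv_len_ofList_iff (l : List Int) :
    (l.length == (PySem.Set.ofList l).length) = true ↔ l.Nodup := by
  have h1 : (PySem.Set.ofList l).toFinset = l.toFinset := by
    ext x; simp [List.mem_toFinset, PySem.Set.mem_ofList]
  have h2 : (PySem.Set.ofList l).length = l.toFinset.card := by
    rw [← h1]; exact (List.toFinset_card_of_nodup (PySem.Set.nodup_ofList l)).symm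
  have h3 : l.dedup.length = l.toFinset.card := by
    have hf : l.dedup.toFinset = l.toFinset := by
      ext x; simp [List.mem_toFinset, List.mem_dedup]
    rw [← hf]
    exact (List.toFinset_card_of_nodup l.nodup_dedup).symm
  rw [beq_iff_eq, h2]
  constructor
  · intro h
    have := List.Sublist.eq_of_length (List.dedup_sublist l) (by omega)
    exact List.dedup_eq_self.mp this
  · intro h
    rw [← h3, List.dedup_eq_self.mpr h]

lemma pv_altRowDup_false_iff (row : List Int) (seen : PySem.Set Int) :
    altRowDup row seen = false ↔ row.Nodup ∧ ∀ x ∈ row, x ∉ seen := by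
  induction row generalizing seen with
  | nil => simp [altRowDup]
  | cons x xs ih =>
    simp only [altRowDup]
    by_cases hc : x ∈ seen
    · simp [hc]
    · have hcf : PySem.Set.contains seen x = false := by
        rcases Bool.eq_false_or_eq_true (PySem.Set.contains seen x) with h | h
        · exact absurd ((PySem.Set.contains_iff seen x).mp h) hc
        · exact h
      rw [hcf]
      simp only [Bool.false_eq_true, if_false, ih, List.nodup_cons, List.mem_cons]
      constructor
      · rintro ⟨hn, hall⟩
        have hx : x ∉ xs := fun hm => by
          have := hall x hm; rw [PySem.Set.mem_add] at this; simp at this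
        refine ⟨⟨hx, hn⟩, ?_⟩
        rintro y (rfl | hy)
        · exact hc
        · intro hys
          exact (hall y hy) ((PySem.Set.mem_add seen x y).mpr (Or.inl hys))
      · rintro ⟨⟨hx, hn⟩, hall⟩
        refine ⟨hn, ?_⟩
        intro y hy hmem
        rcases (PySem.Set.mem_add seen x y).mp hmem with hys | rfl
        · exact hall y (Or.inr hy) hys
        · exact hx hy

lemma pv_altCols_eq (row : List Int) (sets : List (PySem.Set Int))
    (h : sets.length ≤ row.length) :
    altCols row sets =
      if ∀ j, (hj : j < sets.length) → row.getD j 0 ∉ sets[j] then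
        some (List.zipWith (fun x s => PySem.Set.add s x) row sets)
      else none := by
  induction sets generalizing row with
  | nil => cases row <;> simp [altCols]
  | cons s ss ih =>
    cases row with
    | nil => simp at h
    | cons x xs =>
      simp only [List.length_cons, Nat.add_le_add_iff_right] at h
      simp only [altCols, List.zipWith_cons_cons]
      by_cases hc : x ∈ s
      · rw [if_pos ((PySem.Set.contains_iff s x).mpr hc)]
        rw [if_neg]
        intro hall
        exact (hall 0 (by simp)) (by simpa using hc)
      · have hcf : PySem.Set.contains s x = false := by
          rcases Bool.eq_false_or_eq_true (PySem.Set.contains s x) with hb | hb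
          · exact absurd ((PySem.Set.contains_iff s x).mp hb) hc
          · exact hb
        rw [hcf]
        simp only [Bool.false_eq_true, if_false]
        rw [ih xs h]
        by_cases hall : ∀ j, (hj : j < ss.length) → xs.getD j 0 ∉ ss[j]
        · rw [if_pos hall, if_pos]
          intro j hj
          cases j with
          | zero => simpa using hc
          | succ k => simpa using hall k (by simpa using hj)
        · rw [if_neg hall, if_neg]
          intro hall'
          exact hall fun j hj => by simpa using hall' (j+1) (by simpa using hj)

lemma pv_altGo_iff (rows : List (List Int)) (sets : List (PySem.Set Int))
    (h : ∀ r ∈ rows, sets.length ≤ r.length) :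
    altGo rows sets = true ↔
      (∀ r ∈ rows, r.Nodup) ∧
      ∀ j, (hj : j < sets.length) →
        (pvCol j rows).Nodup ∧ ∀ x ∈ pvCol j rows, x ∉ sets[j] := by
  induction rows generalizing sets with
  | nil => simp [altGo, pvCol]
  | cons row rest ih =>
    have hrow : sets.length ≤ row.length := h row (by simp)
    have hrest : ∀ r ∈ rest, sets.length ≤ r.length := fun r hr => h r (by simp [hr])
    simp only [altGo]
    by_cases hd : altRowDup row PySem.Set.empty = true
    · rw [if_pos hd]
      constructor
      · intro hfalse; simp at hfalse
      · rintro ⟨hns, -⟩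
        have : altRowDup row PySem.Set.empty = false :=
          (pv_altRowDup_false_iff row PySem.Set.empty).mpr
            ⟨hns row (by simp), by intro x hx hmem; simp [PySem.Set.empty] at hmem⟩
        rw [this] at hd; simp at hd
    · rw [if_neg hd]
      have hdf : altRowDup row PySem.Set.empty = false := by
        rcases Bool.eq_false_or_eq_true (altRowDup row PySem.Set.empty) with hb | hb
        · exact absurd hb hd
        · exact hb
      have hnr : row.Nodup := ((pv_altRowDup_false_iff row PySem.Set.empty).mp hdf).1
      rw [pv_altCols_eq row sets hrow]
      by_cases hC : ∀ j, (hj : j < sets.length) → row.getD j 0 ∉ sets[j]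
      · rw [if_pos hC]
        have hlen : (List.zipWith (fun x s => PySem.Set.add s x) row sets).length
            = sets.length := by
          simp [List.length_zipWith]; omega
        rw [show (match some (List.zipWith (fun x s => PySem.Set.add s x) row sets) with
              | none => false
              | some sets' => altGo rest sets') = altGo rest
                (List.zipWith (fun x s => PySem.Set.add s x) row sets) from rfl]
        rw [ih _ (fun r hr => hlen ▸ hrest r hr)]
        constructor
        · rintro ⟨hns, hcols⟩
          refine ⟨?_, ?_⟩
          · intro r hr
            rcases List.mem_cons.mp hr with rfl | hr'
            · exact hnr
            · exact hns r hr'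
          · intro j hj
            obtain ⟨hcn, hcm⟩ := hcols j (by omega)
            have hget : (List.zipWith (fun x s => PySem.Set.add s x) row sets)[j] =
                PySem.Set.add sets[j] (row.getD j 0) := by
              rw [List.getElem_zipWith]
              rw [List.getD_eq_getElem row 0 (lt_of_lt_of_le hj hrow)]
            rw [hget] at hcm
            have hhead : row.getD j 0 ∉ pvCol j rest := by
              intro hm
              exact (hcm _ hm) ((PySem.Set.mem_add _ _ _).mpr (Or.inr rfl))
            refine ⟨?_, ?_⟩
            · show (List.map (fun t => t.getD j 0) (row :: rest)).Nodup
              rw [List.map_cons, List.nodup_cons]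
              exact ⟨hhead, hcn⟩
            · intro x hx
              rcases List.mem_cons.mp hx with rfl | hx'
              · exact hC j hj
              · intro hmem
                exact (hcm x hx') ((PySem.Set.mem_add _ _ _).mpr (Or.inl hmem))
        · rintro ⟨hns, hcols⟩
          refine ⟨fun r hr => hns r (by simp [hr]), ?_⟩
          intro j hj
          have hj' : j < sets.length := by omega
          obtain ⟨hcn, hcm⟩ := hcols j hj'
          rw [show pvCol j (row :: rest) = row.getD j 0 :: pvCol j rest from rfl] at hcn hcm
          rw [List.nodup_cons] at hcn
          have hget : (List.zipWith (fun x s => PySem.Set.add s x) row sets)[j] =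
              PySem.Set.add sets[j] (row.getD j 0) := by
            rw [List.getElem_zipWith]
            rw [List.getD_eq_getElem row 0 (lt_of_lt_of_le hj' hrow)]
          refine ⟨hcn.2, ?_⟩
          intro x hx hmem
          rw [hget] at hmem
          rcases (PySem.Set.mem_add _ _ _).mp hmem with hms | rfl
          · exact (hcm x (List.mem_cons_of_mem _ hx)) hms
          · exact hcn.1 hx
      · rw [if_neg hC]
        constructor
        · intro hfalse; simp at hfalse
        · rintro ⟨-, hcols⟩
          push Not at hC
          obtain ⟨j, hj, hmem⟩ := hC
          exact absurd hmem ((hcols j hj).2 (row.getD j 0) (by simp [pvCol]))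

-- ===== VERDICT (by name: the statement is the Claim_ definition above) =====
theorem checkValidZip_spec : Claim_equal_checkValidZip := by
  intro matrix _
  unfold Spec_checkValidZip
  cases matrix with
  | nil => rfl
  | cons r rs =>
    have hmin : ∀ t ∈ r :: rs,
        rs.foldl (fun a t => min a t.length) r.length ≤ t.length := by
      intro t ht
      rcases List.mem_cons.mp ht with rfl | ht'
      · exact pv_foldl_min_le_acc rs _
      · exact pv_foldl_min_le_mem rs _ t ht'
    rw [Bool.eq_iff_iff]
    have hA : checkValidZip (r :: rs) = true ↔
        (∀ t ∈ r :: rs, t.Nodup) ∧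
        ∀ j, j < rs.foldl (fun a t => min a t.length) r.length →
          (pvCol j (r :: rs)).Nodup := by
      simp only [checkValidZip, pyZipStar, Bool.and_eq_true, List.all_eq_true,
        List.mem_map, List.mem_range]
      constructor
      · rintro ⟨h1, h2⟩
        refine ⟨fun t ht => (pv_len_ofList_iff t).mp (h1 t ht), ?_⟩
        intro j hj
        exact (pv_len_ofList_iff _).mp (h2 _ ⟨j, hj, rfl⟩)
      · rintro ⟨h1, h2⟩
        refine ⟨fun t ht => (pv_len_ofList_iff t).mpr (h1 t ht), ?_⟩
        rintro c ⟨j, hj, rfl⟩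
        exact (pv_len_ofList_iff _).mpr (h2 j hj)
    have hB : checkValidZip_alt (r :: rs) = true ↔
        (∀ t ∈ r :: rs, t.Nodup) ∧
        ∀ j, j < rs.foldl (fun a t => min a t.length) r.length →
          (pvCol j (r :: rs)).Nodup := by
      show altGo (r :: rs)
          (List.replicate (rs.foldl (fun a t => min a t.length) r.length)
            PySem.Set.empty) = true ↔ _
      rw [pv_altGo_iff _ _ (by simpa using hmin)]
      simp only [List.length_replicate, List.getElem_replicate]
      constructor
      · rintro ⟨h1, h2⟩
        exact ⟨h1, fun j hj => (h2 j hj).1⟩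
      · rintro ⟨h1, h2⟩
        refine ⟨h1, fun j hj => ⟨h2 j hj, ?_⟩⟩
        intro x hx hmem
        simp [PySem.Set.empty] at hmem
    rw [hA, hB]
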